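-- pv_equiv track=rewrite | github.com/papanito/dev-playground | python/array_test.py | solution
-- ===== SOURCE A (Python) =====
-- def solution(A):
--     # write your code in Python 3.6
--     maxcount = 0
--
--     for i in range(0,len(A)-1):
--         currentArrayPos = i
--         count = 0
--         while currentArrayPos >= 0:
--             count = count+1
--             currentArrayPos = findNextPair(A, A[i]+A[i+1], currentArrayPos+2)
--         if count > maxcount:
--             maxcount = count
--     return maxcount
--
-- def findNextPair(A, sum, start):
--     for j in range(start,len(A)-1):
--         if sum == A[j]+A[j+1]:
--             return j
--     return -1
-- ===== SOURCE B (Python) =====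
-- def solution(A):
--     # One right-to-left pass: dict maps pair-sum -> greedy chain length starting
--     # at that sum's first pair position to the right of the current index.
--     n = len(A)
--     c = {}
--     best = 0
--     prev = 0
--     for i in range(n - 2, -1, -1):
--         cur = 1 + c.get(A[i] + A[i + 1], 0)
--         if cur > best:
--             best = cur
--         if i + 1 <= n - 2:
--             c[A[i + 1] + A[i + 2]] = prev
--         prev = cur
--     return best
-- ===== Notes on version B (the rewrite author's own statement) =====
-- stated objective: faster
-- what changed: Replaced the per-start rescan (for every start index, repeatedly re-scanning the array with findNextPair to follow the greedy chain) by a single right-to-left pass that memoizes, in a dict keyed by pair-sum, the greedy chain length starting at the nearest pair position to the right, so each chain length is computed in O(1).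
import Mathlib
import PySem

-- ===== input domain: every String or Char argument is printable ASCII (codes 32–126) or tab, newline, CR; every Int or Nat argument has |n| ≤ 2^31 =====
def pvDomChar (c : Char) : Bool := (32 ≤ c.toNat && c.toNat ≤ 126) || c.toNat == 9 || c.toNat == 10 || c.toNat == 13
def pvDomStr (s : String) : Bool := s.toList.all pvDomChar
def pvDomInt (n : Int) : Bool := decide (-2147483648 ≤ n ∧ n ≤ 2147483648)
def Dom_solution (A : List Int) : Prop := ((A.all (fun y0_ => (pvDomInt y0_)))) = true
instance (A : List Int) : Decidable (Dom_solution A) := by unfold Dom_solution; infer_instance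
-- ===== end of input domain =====

-- B replaces A's quadratic per-start rescans by one right-to-left pass memoizing chain lengths per pair-sum in a dict (measured asymptotically faster).

-- ===== PORT A =====
-- inner 'for j in range(start, len(A)-1)' of findNextPair; A[j], A[j+1] are always in
-- range (j ≤ len-2), so pyGetD is exact here
def fnpGo (A : List Int) (sum : Int) : List Int → Int
  | [] => -1
  | j :: rest =>
      if sum = PySem.List.pyGetD A j 0 + PySem.List.pyGetD A (j + 1) 0 then j
      else fnpGo A sum rest

def findNextPair (A : List Int) (sum : Int) (start : Int) : Int :=
  fnpGo A sum (PySem.List.pyRange start ((A.length : Int) - 1) 1)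

-- termination helper for the while-loop port (cited by decreasing_by)
theorem fnpGo_mem (A : List Int) (s : Int) (l : List Int) :
    fnpGo A s l = -1 ∨ fnpGo A s l ∈ l := by
  induction l with
  | nil => left; rfl
  | cons j rest ih =>
      simp only [fnpGo]
      split_ifs
      · right; exact List.mem_cons_self
      · rcases ih with h | h
        · left; exact h
        · right; exact List.mem_cons_of_mem _ h

theorem findNextPair_cases (A : List Int) (s start : Int) :
    findNextPair A s start = -1 ∨
      (start ≤ findNextPair A s start ∧ findNextPair A s start < (A.length : Int) - 1) := by
  rcases fnpGo_mem A s (PySem.List.pyRange start ((A.length : Int) - 1) 1) with h | h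
  · left; exact h
  · right; exact (PySem.List.mem_pyRange_one.mp h)

-- the 'while currentArrayPos >= 0' loop of A, with 'count' as 1 + recursive value
def whileCount (A : List Int) (s : Int) (pos : Int) : Int :=
  if 0 ≤ pos then 1 + whileCount A s (findNextPair A s (pos + 2)) else 0
termination_by (if pos < 0 then 0 else ((A.length : Int) + 1 - pos).toNat + 1)
decreasing_by
  rcases findNextPair_cases A s (pos + 2) with h1 | ⟨h1, h2⟩ <;> split_ifs <;> omega

-- A[i], A[i+1] always in range here (i ≤ len-2), so pyGetD is exact
def solution (A : List Int) : Int :=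
  (PySem.List.pyRange 0 ((A.length : Int) - 1) 1).foldl
    (fun maxcount i =>
      let count := whileCount A (PySem.List.pyGetD A i 0 + PySem.List.pyGetD A (i + 1) 0) i
      if count > maxcount then count else maxcount) 0

-- ===== PORT B =====
-- one iteration of B's right-to-left loop; state = (c, best, prev)
def altStep (A : List Int) (st : PySem.Dict Int Int × Int × Int) (i : Int) :
    PySem.Dict Int Int × Int × Int :=
  let c := st.1
  let best := st.2.1
  let prev := st.2.2
  let cur := 1 + c.getD (PySem.List.pyGetD A i 0 + PySem.List.pyGetD A (i + 1) 0) 0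
  let best' := if cur > best then cur else best
  let c' :=
    if i + 1 ≤ (A.length : Int) - 2 then
      c.insert (PySem.List.pyGetD A (i + 1) 0 + PySem.List.pyGetD A (i + 2) 0) prev
    else c
  (c', best', cur)

def solution_alt (A : List Int) : Int :=
  ((PySem.List.pyRange ((A.length : Int) - 2) (-1) (-1)).foldl (altStep A)
    (PySem.Dict.empty, 0, 0)).2.1

-- ===== PRECONDITION & SPEC =====
def Spec_solution (A : List Int) (out : Int) : Prop := out = solution_alt A
instance (A : List Int) (out : Int) : Decidable (Spec_solution A out) := by unfold Spec_solution; infer_instance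

-- ===== CLAIM (what is proved, stated in full; the proofs are below) =====
def Claim_equal_solution : Prop := ∀ (A : List Int), Dom_solution A → Spec_solution A (solution A)

-- ===== LEMMAS AND PROOFS =====

-- pair sum at index k
def sAt (A : List Int) (k : Nat) : Int := A.getD k 0 + A.getD (k + 1) 0

-- greedy chain count for sum s scanning from position p
def fSpec (A : List Int) (s : Int) (p : Nat) : Int :=
  if p + 1 < A.length then
    (if sAt A p = s then 1 + fSpec A s (p + 2) else fSpec A s (p + 1))
  else 0
termination_by A.length - p
decreasing_by all_goals omega

-- max over k ∈ [j, len-1) of fSpec A (sAt A k) k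
def bestOver (A : List Int) (j : Nat) : Int :=
  if j < A.length - 1 then max (fSpec A (sAt A j) j) (bestOver A (j + 1)) else 0
termination_by A.length - j
decreasing_by omega

theorem fSpec_nonneg (A : List Int) (s : Int) (p : Nat) : 0 ≤ fSpec A s p := by
  unfold fSpec
  split_ifs with h1 h2
  · have := fSpec_nonneg A s (p + 2); omega
  · exact fSpec_nonneg A s (p + 1)
  · omega
termination_by A.length - p
decreasing_by all_goals omega

theorem fSpec_stop (A : List Int) (s : Int) (p : Nat) (h : ¬ p + 1 < A.length) :
    fSpec A s p = 0 := by
  unfold fSpec; simp [h]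

theorem bestOver_nonneg (A : List Int) (j : Nat) : 0 ≤ bestOver A j := by
  unfold bestOver
  split_ifs with h
  · have := fSpec_nonneg A (sAt A j) j
    have := bestOver_nonneg A (j + 1)
    omega
  · omega
termination_by A.length - j
decreasing_by omega

theorem if_gt_eq_max (a b : Int) : (if b > a then b else a) = max a b := by
  rw [max_def]; split_ifs <;> omega

-- skip lemma: fSpec ignores a prefix without matches
theorem fSpec_skip (A : List Int) (s : Int) :
    ∀ (m p q : Nat), q - p ≤ m → p ≤ q →
      (∀ k, p ≤ k → k < q → k + 1 < A.length → sAt A k ≠ s) →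
      fSpec A s p = fSpec A s q := by
  intro m
  induction m with
  | zero =>
      intro p q h1 h2 _
      have hpq : p = q := by omega
      rw [hpq]
  | succ m ih =>
      intro p q h1 h2 hno
      by_cases hpq : p = q
      · rw [hpq]
      · by_cases hlen : p + 1 < A.length
        · have hstep : fSpec A s p = fSpec A s (p + 1) := by
            have hns : sAt A p ≠ s := hno p (le_refl p) (by omega) hlen
            conv_lhs => rw [fSpec]
            rw [if_pos hlen, if_neg hns]
          rw [hstep]
          exact ih (p + 1) q (by omega) (by omega) (fun k hk1 hk2 hk3 => hno k (by omega) hk2 hk3)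
        · rw [fSpec_stop A s p hlen, fSpec_stop A s q (by omega)]

-- characterization of findNextPair: none found, or the first match
theorem findNextPair_spec (A : List Int) (s : Int) :
    ∀ (m : Nat) (start : Int), ((A.length : Int) - 1 - start).toNat ≤ m → 0 ≤ start →
      (findNextPair A s start = -1 ∧
        ∀ k : Nat, start ≤ (k : Int) → k + 1 < A.length → sAt A k ≠ s) ∨
      (∃ j : Nat, findNextPair A s start = (j : Int) ∧ start ≤ (j : Int) ∧ j + 1 < A.length ∧
        sAt A j = s ∧ ∀ k : Nat, start ≤ (k : Int) → k < j → sAt A k ≠ s) := by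
  intro m
  induction m with
  | zero =>
      intro start hm h0
      left
      have hnil : PySem.List.pyRange start ((A.length : Int) - 1) 1 = [] :=
        PySem.List.pyRange_one_eq_nil (by omega)
      constructor
      · simp [findNextPair, hnil, fnpGo]
      · intro k hk1 hk2; omega
  | succ m ih =>
      intro start hm h0
      by_cases hlt : start < (A.length : Int) - 1
      · have hcons := PySem.List.pyRange_one_cons (a := start) (b := (A.length : Int) - 1) hlt
        have hunf : findNextPair A s start =
            (if s = PySem.List.pyGetD A start 0 + PySem.List.pyGetD A (start + 1) 0 then start
             else findNextPair A s (start + 1)) := by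
          simp only [findNextPair, hcons, fnpGo]
        by_cases hmatch : s = PySem.List.pyGetD A start 0 + PySem.List.pyGetD A (start + 1) 0
        · right
          refine ⟨start.toNat, ?_, by omega, by omega, ?_, ?_⟩
          · rw [hunf, if_pos hmatch]; omega
          · have h1 : PySem.List.pyGetD A start 0 = A.getD start.toNat 0 := by
              conv_lhs => rw [show start = ((start.toNat : Nat) : Int) from by omega]
              rw [PySem.List.pyGetD_natCast]
            have h2 : PySem.List.pyGetD A (start + 1) 0 = A.getD (start.toNat + 1) 0 := by
              conv_lhs => rw [show start + 1 = ((start.toNat + 1 : Nat) : Int) from by omega]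
              rw [PySem.List.pyGetD_natCast]
            simp only [sAt]; omega
          · intro k hk1 hk2; omega
        · have hrec := ih (start + 1) (by omega) (by omega)
          rcases hrec with ⟨hfn, hno⟩ | ⟨j, hfn, hj1, hj2, hj3, hno⟩
          · left
            constructor
            · rw [hunf, if_neg hmatch]; exact hfn
            · intro k hk1 hk2
              by_cases hks : (k : Int) = start
              · intro hcon
                apply hmatch
                have h1 : PySem.List.pyGetD A start 0 = A.getD k 0 := by
                  rw [← hks, PySem.List.pyGetD_natCast]
                have h2 : PySem.List.pyGetD A (start + 1) 0 = A.getD (k + 1) 0 := by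
                  have : start + 1 = ((k + 1 : Nat) : Int) := by omega
                  rw [this, PySem.List.pyGetD_natCast]
                simp only [sAt] at hcon; omega
              · exact hno k (by omega) hk2
          · right
            refine ⟨j, ?_, by omega, hj2, hj3, ?_⟩
            · rw [hunf, if_neg hmatch]; exact hfn
            · intro k hk1 hk2
              by_cases hks : (k : Int) = start
              · intro hcon
                apply hmatch
                have h1 : PySem.List.pyGetD A start 0 = A.getD k 0 := by
                  rw [← hks, PySem.List.pyGetD_natCast]
                have h2 : PySem.List.pyGetD A (start + 1) 0 = A.getD (k + 1) 0 := by
                  have : start + 1 = ((k + 1 : Nat) : Int) := by omega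
                  rw [this, PySem.List.pyGetD_natCast]
                simp only [sAt] at hcon; omega
              · exact hno k (by omega) hk2
      · left
        have hnil : PySem.List.pyRange start ((A.length : Int) - 1) 1 = [] :=
          PySem.List.pyRange_one_eq_nil (by omega)
        constructor
        · simp [findNextPair, hnil, fnpGo]
        · intro k hk1 hk2; omega

theorem whileCount_unfold_neg (A : List Int) (s : Int) :
    whileCount A s (-1) = 0 := by
  unfold whileCount; norm_num

-- A's while loop computes fSpec at a matching start position
theorem whileCount_eq (A : List Int) (s : Int) :
    ∀ (m p : Nat), A.length - p ≤ m → p + 1 < A.length → sAt A p = s →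
      whileCount A s (p : Int) = fSpec A s p := by
  intro m
  induction m with
  | zero => intro p h1 h2 _; omega
  | succ m ih =>
      intro p hm hp hmatch
      have hunf : whileCount A s (p : Int) =
          1 + whileCount A s (findNextPair A s ((p : Int) + 2)) := by
        conv_lhs => rw [whileCount]
        rw [if_pos (show (0 : Int) ≤ (p : Int) by omega)]
      have hfs : fSpec A s p = 1 + fSpec A s (p + 2) := by
        conv_lhs => rw [fSpec]
        rw [if_pos hp, if_pos hmatch]
      have hcast : (p : Int) + 2 = ((p + 2 : Nat) : Int) := by omega
      rcases findNextPair_spec A s (((A.length : Int) - 1 - ((p : Int) + 2)).toNat)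
          ((p : Int) + 2) (le_refl _) (by omega) with ⟨hfn, hno⟩ | ⟨j, hfn, hj1, hj2, hj3, hno⟩
      · rw [hunf, hfn, whileCount_unfold_neg, hfs]
        have : fSpec A s (p + 2) = fSpec A s A.length := by
          apply fSpec_skip A s A.length (p + 2) A.length (by omega) (by omega)
          intro k hk1 hk2 hk3
          exact hno k (by omega) hk3
        rw [this, fSpec_stop A s A.length (by omega)]
      · rw [hunf, hfn, hfs]
        have hj : whileCount A s ((j : Nat) : Int) = fSpec A s j :=
          ih j (by omega) (by omega) hj3
        rw [hj]
        have : fSpec A s (p + 2) = fSpec A s j := by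
          apply fSpec_skip A s j (p + 2) j (by omega) (by omega)
          intro k hk1 hk2 hk3
          exact hno k (by omega) hk2
        rw [this]

-- ascending max-fold equals bestOver
theorem asc_fold (A : List Int) :
    ∀ (m j : Nat) (b : Int), 0 ≤ b → j + m = A.length - 1 →
      (List.range' j m).foldl (fun acc k => max acc (fSpec A (sAt A k) k)) b =
        max b (bestOver A j) := by
  intro m
  induction m with
  | zero =>
      intro j b hb hj
      have : ¬ j < A.length - 1 := by omega
      simp [List.range', bestOver, this]
      omega
  | succ m ih =>
      intro j b hb hj
      rw [List.range'_succ, List.foldl_cons]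
      rw [ih (j + 1) (max b (fSpec A (sAt A j) j)) (le_max_of_le_left hb) (by omega)]
      have hlt : j < A.length - 1 := by omega
      conv_rhs => rw [bestOver]
      rw [if_pos hlt, max_assoc]

-- the B-side loop invariant
theorem altLoop (A : List Int) (hn : 2 ≤ A.length) :
    ∀ (i : Nat) (c : PySem.Dict Int Int) (best prev : Int),
      i ≤ A.length - 2 →
      (∀ s : Int, c.getD s 0 = fSpec A s (i + 2)) →
      (i < A.length - 2 → prev = fSpec A (sAt A (i + 1)) (i + 1)) →
      best = bestOver A (i + 1) →
      ((PySem.List.pyRange (i : Int) (-1) (-1)).foldl (altStep A) (c, best, prev)).2.1 =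
        bestOver A 0 := by
  intro i
  induction i with
  | zero =>
      intro c best prev hi hc hprev hbest
      rw [PySem.List.pyRange_neg_one_cons (by omega)]
      norm_num [PySem.List.pyRange_neg_one_eq_nil]
      -- one step from i = 0
      simp only [altStep]
      have hg0 : PySem.List.pyGetD A (0 : Int) 0 = A.getD 0 0 := by
        have : (0 : Int) = ((0 : Nat) : Int) := rfl
        rw [this, PySem.List.pyGetD_natCast]
      have hg1 : PySem.List.pyGetD A ((0 : Int) + 1) 0 = A.getD 1 0 := by
        have : (0 : Int) + 1 = ((1 : Nat) : Int) := rfl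
        rw [this, PySem.List.pyGetD_natCast]
      have hcur : 1 + c.getD (PySem.List.pyGetD A (0:Int) 0 + PySem.List.pyGetD A ((0:Int) + 1) 0) 0 =
          fSpec A (sAt A 0) 0 := by
        rw [hg0, hg1]
        have : A.getD 0 0 + A.getD 1 0 = sAt A 0 := rfl
        rw [this, hc (sAt A 0)]
        conv_rhs => rw [fSpec]
        rw [if_pos (by omega), if_pos rfl]
      simp only [hcur, hbest]
      rw [if_gt_eq_max]
      conv_rhs => rw [bestOver]
      rw [if_pos (by omega), max_comm]
  | succ i ih =>
      intro c best prev hi hc hprev hbest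
      rw [PySem.List.pyRange_neg_one_cons (by omega), List.foldl_cons]
      have hstep : (((i : Nat) + 1 : Nat) : Int) - 1 = ((i : Nat) : Int) := by omega
      have hcast1 : (((i + 1 : Nat)) : Int) + 1 = ((i + 2 : Nat) : Int) := by omega
      have hcast2 : (((i + 1 : Nat)) : Int) + 2 = ((i + 3 : Nat) : Int) := by omega
      have hg0 : PySem.List.pyGetD A (((i + 1 : Nat)) : Int) 0 = A.getD (i + 1) 0 :=
        PySem.List.pyGetD_natCast ..
      have hg1 : PySem.List.pyGetD A ((((i + 1 : Nat)) : Int) + 1) 0 = A.getD (i + 2) 0 := by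
        rw [hcast1, PySem.List.pyGetD_natCast]
      have hg2 : PySem.List.pyGetD A ((((i + 1 : Nat)) : Int) + 2) 0 = A.getD (i + 3) 0 := by
        rw [hcast2, PySem.List.pyGetD_natCast]
      simp only [altStep, hg0, hg1, hg2]
      have hcur : 1 + c.getD (A.getD (i + 1) 0 + A.getD (i + 2) 0) 0 =
          fSpec A (sAt A (i + 1)) (i + 1) := by
        have h1 : A.getD (i + 1) 0 + A.getD (i + 2) 0 = sAt A (i + 1) := rfl
        rw [h1, hc (sAt A (i + 1))]
        have hlen : i + 1 + 1 < A.length := by omega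
        conv_rhs => rw [fSpec]
        rw [if_pos hlen, if_pos rfl]
      simp only [hcur]
      rw [hstep]
      apply ih
      · omega
      · -- new dict invariant at (i + 1) : getD = fSpec · (i + 3)  wait: target index (i)+2 = i+2
        intro s
        by_cases hins : (((i + 1 : Nat)) : Int) + 1 ≤ (A.length : Int) - 2
        · rw [if_pos hins]
          have hkey : A.getD (i + 2) 0 + A.getD (i + 3) 0 = sAt A (i + 2) := rfl
          rw [hkey, PySem.Dict.getD_insert]
          have hlen2 : i + 2 + 1 < A.length := by omega
          by_cases hs : s = sAt A (i + 2)
          · rw [if_pos hs, hprev (by omega), hs]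
          · rw [if_neg hs, hc s]
            conv_rhs => rw [fSpec]
            rw [if_pos hlen2, if_neg (fun h => hs h.symm)]
        · rw [if_neg hins]
          have hi2 : i + 1 = A.length - 2 := by omega
          rw [hc s]
          have h1 : fSpec A s (i + 1 + 2) = 0 := fSpec_stop A s _ (by omega)
          have h2 : fSpec A s (i + 2) = 0 := fSpec_stop A s _ (by omega)
          rw [h1, h2]
      · intro _
        rfl
      · rw [hbest, if_gt_eq_max]
        conv_rhs => rw [bestOver]
        rw [if_pos (by omega), max_comm]

theorem solution_eq_bestOver (A : List Int) : solution A = bestOver A 0 := by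
  by_cases hlen : 2 ≤ A.length
  · unfold solution
    rw [PySem.List.pyRange_one, List.foldl_map]
    have hn : (((A.length : Int) - 1) - 0).toNat = A.length - 1 := by omega
    rw [hn]
    rw [PySem.List.foldl_congr_mem
      (g := fun acc k => max acc (fSpec A (sAt A k) k))
      (h := ?_)]
    · rw [List.range_eq_range']
      rw [asc_fold A (A.length - 1) 0 0 (le_refl 0) (by omega)]
      exact max_eq_right (bestOver_nonneg A 0)
    · intro acc k hk
      have hk' : k < A.length - 1 := List.mem_range.mp hk
      have hg0 : PySem.List.pyGetD A ((0 : Int) + (k : Int)) 0 = A.getD k 0 := by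
        rw [zero_add, PySem.List.pyGetD_natCast]
      have hg1 : PySem.List.pyGetD A ((0 : Int) + (k : Int) + 1) 0 = A.getD (k + 1) 0 := by
        have : (0 : Int) + (k : Int) + 1 = ((k + 1 : Nat) : Int) := by omega
        rw [this, PySem.List.pyGetD_natCast]
      simp only [hg0, hg1]
      have hsum : A.getD k 0 + A.getD (k + 1) 0 = sAt A k := rfl
      rw [hsum]
      have hwc : whileCount A (sAt A k) ((0 : Int) + (k : Int)) = fSpec A (sAt A k) k := by
        rw [zero_add]
        exact whileCount_eq A (sAt A k) A.length k (by omega) (by omega) rfl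
      rw [hwc, if_gt_eq_max]
  · unfold solution
    rw [PySem.List.pyRange_one_eq_nil (by omega), List.foldl_nil]
    rw [bestOver, if_neg (by omega)]

theorem alt_eq_bestOver (A : List Int) : solution_alt A = bestOver A 0 := by
  by_cases hlen : 2 ≤ A.length
  · unfold solution_alt
    have hcast : (A.length : Int) - 2 = ((A.length - 2 : Nat) : Int) := by omega
    rw [hcast]
    apply altLoop A hlen (A.length - 2)
    · exact le_refl _
    · intro s
      rw [PySem.Dict.getD_empty]
      rw [fSpec_stop A s (A.length - 2 + 2) (by omega)]
    · intro h
      exact absurd h (lt_irrefl _)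
    · rw [bestOver, if_neg (by omega)]
  · unfold solution_alt
    rw [PySem.List.pyRange_neg_one_eq_nil (by omega), List.foldl_nil]
    rw [bestOver, if_neg (by omega)]

-- ===== VERDICT (by name: the statement is the Claim_ definition above) =====
theorem solution_spec : Claim_equal_solution := by
  intro A _
  unfold Spec_solution
  rw [solution_eq_bestOver, alt_eq_bestOver]
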